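-- pv_equiv track=rewrite | github.com/umerhere23/filaops | backend/app/services/customer_service.py | _detect_csv_format
-- ===== SOURCE A (Python) =====
-- def _detect_csv_format(headers: list[str]) -> str:
--     """Detect the source platform from CSV column headers."""
--     headers_lower = [h.lower().strip() for h in headers]
--
--     if any("billing" in h and "first" in h for h in headers_lower):
--         return "WooCommerce"
--     if (
--         any(h in ("first name", "last name") for h in headers_lower)
--         and "company" in headers_lower
--     ):
--         return "Shopify"
--     if any("ship_" in h or ("buyer" in h and "name" in h) for h in headers_lower):
--         return "Etsy/TikTok Shop"
--     if any("unit_price" in h or "cost_price" in h for h in headers_lower):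
--         return "TikTok Shop"
--     if "email" in headers_lower:
--         return "Generic/Squarespace"
--     return "Unknown"
-- ===== SOURCE B (Python) =====
-- def _detect_csv_format(headers: list[str]) -> str:
--     """Detect the source platform from CSV column headers.
--
--     Each header is mapped to a bitmask of features; all masks are OR'd into one
--     integer signature, and a declarative rule table (required-bits -> platform)
--     is scanned for the first rule whose bits are all present in the signature.
--     """
--     BILLING_FIRST, FIRST_LAST, COMPANY, SHIP_BUYER, PRICE, EMAIL = 1, 2, 4, 8, 16, 32
--
--     def feats(h):
--         m = 0
--         if "billing" in h and "first" in h: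
--             m |= BILLING_FIRST
--         if h in ("first name", "last name"):
--             m |= FIRST_LAST
--         if h == "company":
--             m |= COMPANY
--         if "ship_" in h or ("buyer" in h and "name" in h):
--             m |= SHIP_BUYER
--         if "unit_price" in h or "cost_price" in h:
--             m |= PRICE
--         if h == "email":
--             m |= EMAIL
--         return m
--
--     sig = 0
--     for h in headers:
--         sig |= feats(h.lower().strip())
--
--     RULES = [
--         (BILLING_FIRST, "WooCommerce"),
--         (FIRST_LAST | COMPANY, "Shopify"),
--         (SHIP_BUYER, "Etsy/TikTok Shop"),
--         (PRICE, "TikTok Shop"),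
--         (EMAIL, "Generic/Squarespace"),
--     ]
--     for req, name in RULES:
--         if sig & req == req:
--             return name
--     return "Unknown"
-- ===== Notes on version B (the rewrite author's own statement) =====
-- stated objective: alternative
-- what changed: Replaces six repeated any()/membership scans and a hard-coded if-cascade with a bitmask feature extraction (each header mapped once to a feature mask, all masks OR'd into one integer signature) and a declarative rule table scanned for the first rule whose required bits are all set.
import Mathlib
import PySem

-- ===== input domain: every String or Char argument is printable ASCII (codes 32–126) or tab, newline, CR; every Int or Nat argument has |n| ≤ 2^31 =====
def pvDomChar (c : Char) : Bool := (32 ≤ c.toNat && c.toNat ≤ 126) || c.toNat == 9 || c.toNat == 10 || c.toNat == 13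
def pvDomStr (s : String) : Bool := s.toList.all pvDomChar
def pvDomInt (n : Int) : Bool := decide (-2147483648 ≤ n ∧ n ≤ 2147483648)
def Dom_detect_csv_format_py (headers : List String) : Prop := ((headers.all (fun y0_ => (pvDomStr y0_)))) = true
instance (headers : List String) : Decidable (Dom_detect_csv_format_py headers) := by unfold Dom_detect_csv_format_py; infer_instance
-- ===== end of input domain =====

-- B replaces A's repeated any()/membership scans and if-cascade by a per-header bitmask
-- feature extraction OR'd into one integer signature plus a declarative rule table;
-- objective: alternative (same cost class).

-- ===== PORT A =====
def detect_csv_format_py (headers : List String) : String :=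
  let headers_lower := headers.map (fun h => PySem.Str.strip (PySem.Str.lower h))
  if headers_lower.any (fun h => PySem.Str.isIn "billing" h && PySem.Str.isIn "first" h) then
    "WooCommerce"
  else if (headers_lower.any (fun h => h == "first name" || h == "last name"))
          && headers_lower.contains "company" then
    "Shopify"
  else if headers_lower.any (fun h => PySem.Str.isIn "ship_" h || (PySem.Str.isIn "buyer" h && PySem.Str.isIn "name" h)) then
    "Etsy/TikTok Shop"
  else if headers_lower.any (fun h => PySem.Str.isIn "unit_price" h || PySem.Str.isIn "cost_price" h) then
    "TikTok Shop"
  else if headers_lower.contains "email" then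
    "Generic/Squarespace"
  else
    "Unknown"

-- ===== PORT B =====
-- feats: the bitmask of features of one (already lowered/stripped) header
def detectFeats (h : String) : Nat :=
  let m : Nat := 0
  let m := if PySem.Str.isIn "billing" h && PySem.Str.isIn "first" h then m ||| 1 else m
  let m := if h == "first name" || h == "last name" then m ||| 2 else m
  let m := if h == "company" then m ||| 4 else m
  let m := if PySem.Str.isIn "ship_" h || (PySem.Str.isIn "buyer" h && PySem.Str.isIn "name" h) then m ||| 8 else m
  let m := if PySem.Str.isIn "unit_price" h || PySem.Str.isIn "cost_price" h then m ||| 16 else m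
  let m := if h == "email" then m ||| 32 else m
  m

-- the rule-table scan: first rule whose required bits are all present
def detectApplyRules : List (Nat × String) → Nat → String
  | [], _ => "Unknown"
  | (req, name) :: rest, sig => if sig &&& req == req then name else detectApplyRules rest sig

def detectRules : List (Nat × String) :=
  [(1, "WooCommerce"), (2 ||| 4, "Shopify"), (8, "Etsy/TikTok Shop"),
   (16, "TikTok Shop"), (32, "Generic/Squarespace")]

def detect_csv_format_py_alt (headers : List String) : String :=
  let sig := headers.foldl (fun s h => s ||| detectFeats (PySem.Str.strip (PySem.Str.lower h))) 0
  detectApplyRules detectRules sig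

-- ===== PRECONDITION & SPEC =====
def Spec_detect_csv_format_py (headers : List String) (out : String) : Prop := out = detect_csv_format_py_alt headers
instance (headers : List String) (out : String) : Decidable (Spec_detect_csv_format_py headers out) := by unfold Spec_detect_csv_format_py; infer_instance

-- ===== CLAIM (what is proved, stated in full; the proofs are below) =====
def Claim_equal_detect_csv_format_py : Prop := ∀ (headers : List String), Dom_detect_csv_format_py headers → Spec_detect_csv_format_py headers (detect_csv_format_py headers)

-- ===== LEMMAS AND PROOFS =====

-- numeric value of a 6-bit flag vector (proof-side abstraction)
def bitsVal (b0 b1 b2 b3 b4 b5 : Bool) : Nat :=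
  b0.toNat + 2 * b1.toNat + 4 * b2.toNat + 8 * b3.toNat + 16 * b4.toNat + 32 * b5.toNat

-- detectFeats computes exactly the bit vector of A's six per-header conditions
theorem detectFeats_eq (h : String) :
    detectFeats h =
      bitsVal (PySem.Str.isIn "billing" h && PySem.Str.isIn "first" h)
              (h == "first name" || h == "last name")
              (h == "company")
              (PySem.Str.isIn "ship_" h || (PySem.Str.isIn "buyer" h && PySem.Str.isIn "name" h))
              (PySem.Str.isIn "unit_price" h || PySem.Str.isIn "cost_price" h)
              (h == "email") := by
  unfold detectFeats
  cases PySem.Str.isIn "billing" h && PySem.Str.isIn "first" h <;>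
  cases h == "first name" || h == "last name" <;>
  cases h == "company" <;>
  cases PySem.Str.isIn "ship_" h || (PySem.Str.isIn "buyer" h && PySem.Str.isIn "name" h) <;>
  cases PySem.Str.isIn "unit_price" h || PySem.Str.isIn "cost_price" h <;>
  cases h == "email" <;> rfl

-- OR of two flag values is the value of the pointwise OR
theorem bitsVal_lor : ∀ a0 a1 a2 a3 a4 a5 b0 b1 b2 b3 b4 b5 : Bool,
    bitsVal a0 a1 a2 a3 a4 a5 ||| bitsVal b0 b1 b2 b3 b4 b5 =
      bitsVal (a0 || b0) (a1 || b1) (a2 || b2) (a3 || b3) (a4 || b4) (a5 || b5) := by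
  decide

-- the signature fold accumulates the pointwise OR of all headers' flag vectors
theorem sig_fold_eq (headers : List String) (a0 a1 a2 a3 a4 a5 : Bool) :
    headers.foldl (fun s h => s ||| detectFeats (PySem.Str.strip (PySem.Str.lower h)))
      (bitsVal a0 a1 a2 a3 a4 a5)
    = (let hl := headers.map (fun h => PySem.Str.strip (PySem.Str.lower h))
       bitsVal (a0 || hl.any (fun h => PySem.Str.isIn "billing" h && PySem.Str.isIn "first" h))
               (a1 || hl.any (fun h => h == "first name" || h == "last name"))
               (a2 || hl.contains "company")
               (a3 || hl.any (fun h => PySem.Str.isIn "ship_" h || (PySem.Str.isIn "buyer" h && PySem.Str.isIn "name" h)))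
               (a4 || hl.any (fun h => PySem.Str.isIn "unit_price" h || PySem.Str.isIn "cost_price" h))
               (a5 || hl.contains "email")) := by
  induction headers generalizing a0 a1 a2 a3 a4 a5 with
  | nil => simp [bitsVal]
  | cons x xs ih =>
      rw [List.foldl_cons, detectFeats_eq, bitsVal_lor, ih]
      simp [Bool.or_assoc, BEq.comm, beq_eq_decide, eq_comm]

-- the rule-table scan on a flag-vector signature equals A's priority cascade
theorem applyRules_eq : ∀ b0 b1 b2 b3 b4 b5 : Bool,
    detectApplyRules detectRules (bitsVal b0 b1 b2 b3 b4 b5) =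
      (if b0 then "WooCommerce"
       else if b1 && b2 then "Shopify"
       else if b3 then "Etsy/TikTok Shop"
       else if b4 then "TikTok Shop"
       else if b5 then "Generic/Squarespace"
       else "Unknown") := by
  decide

-- ===== VERDICT (by name: the statement is the Claim_ definition above) =====
theorem detect_csv_format_py_spec : Claim_equal_detect_csv_format_py := by
  intro headers _
  unfold Spec_detect_csv_format_py detect_csv_format_py detect_csv_format_py_alt
  have h0 : (0 : Nat) = bitsVal false false false false false false := rfl
  simp only [h0, sig_fold_eq, applyRules_eq, Bool.false_or]
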